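-- pv_equiv track=rewrite | github.com/IBAB-BioHackTeam/Vineeth-Devadiga | task02/dnaops/transform.py | getupper_standard
-- ===== SOURCE A (Python) =====
-- def getupper_standard(seq):
--     standard=""
--     for base in seq.upper():
--         if base not in ["A",'T',"G",'C',"N"]:
--             standard+="N"
--         else:
--             standard+=base
--     return standard.upper()
-- ===== SOURCE B (Python) =====
-- # Table-driven: one translate pass with a defaultdict-style table instead of a per-char branch (measured faster).
-- _TABLE = {ord(c): c for c in "ATGCN"}
--
-- class _NTable(dict):
--     def __missing__(self, key):
--         return "N"
--
-- _T = _NTable(_TABLE)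
--
-- def getupper_standard(seq):
--     return seq.upper().translate(_T)
-- ===== Notes on version B (the rewrite author's own statement) =====
-- stated objective: faster
-- what changed: Replaces the per-character membership branch and string concatenation with a pre-built translation table and a single str.translate pass over seq.upper().
import Mathlib
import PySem

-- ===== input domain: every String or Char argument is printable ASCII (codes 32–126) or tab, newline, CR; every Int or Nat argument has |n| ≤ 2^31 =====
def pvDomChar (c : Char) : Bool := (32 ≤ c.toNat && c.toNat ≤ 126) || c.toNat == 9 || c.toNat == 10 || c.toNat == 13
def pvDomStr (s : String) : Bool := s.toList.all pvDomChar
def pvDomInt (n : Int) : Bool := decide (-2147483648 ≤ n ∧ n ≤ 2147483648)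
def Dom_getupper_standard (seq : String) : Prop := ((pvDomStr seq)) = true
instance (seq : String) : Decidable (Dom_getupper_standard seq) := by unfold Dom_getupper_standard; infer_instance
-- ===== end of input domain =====

-- B replaces A's per-character membership branch with a pre-built translation table applied
-- in one table-driven pass over seq.upper() (objective: faster, measured; return value only).

-- ===== PORT A =====
-- literal port: loop over seq.upper(), branch on membership, append; final .upper()
def getupper_standard (seq : String) : String :=
  PySem.Str.upper
    (((PySem.Str.upper seq).toList).foldl
      (fun standard base =>
        if base ∉ (['A', 'T', 'G', 'C', 'N'] : List Char) then standard.push 'N'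
        else standard.push base)
      "")

-- ===== PORT B =====
-- the translation table (B's _NTable: seeded entries, missing keys map to 'N')
def pvTable : PySem.Dict Char Char :=
  PySem.Dict.ofList [('A','A'), ('T','T'), ('G','G'), ('C','C'), ('N','N')]

-- seq.upper().translate(_T): one table lookup per character, default 'N'
def getupper_standard_alt (seq : String) : String :=
  String.ofList ((PySem.Str.upper seq).toList.map (fun c => pvTable.getD c 'N'))

-- ===== PRECONDITION & SPEC =====
def Spec_getupper_standard (seq : String) (out : String) : Prop := out = getupper_standard_alt seq
instance (seq : String) (out : String) : Decidable (Spec_getupper_standard seq out) := by unfold Spec_getupper_standard; infer_instance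

-- ===== CLAIM (what is proved, stated in full; the proofs are below) =====
def Claim_equal_getupper_standard : Prop := ∀ (seq : String), Dom_getupper_standard seq → Spec_getupper_standard seq (getupper_standard seq)

-- ===== LEMMAS AND PROOFS =====

lemma pvTable_eq : pvTable = PySem.Dict.mk [('A','A'), ('T','T'), ('G','G'), ('C','C'), ('N','N')] := by decide

-- the table lookup agrees with A's branch
lemma pvTable_getD (c : Char) :
    pvTable.getD c 'N' = if c ∉ (['A', 'T', 'G', 'C', 'N'] : List Char) then 'N' else c := by
  by_cases h : c ∈ (['A', 'T', 'G', 'C', 'N'] : List Char)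
  · simp only [List.mem_cons, List.not_mem_nil, or_false] at h
    rcases h with rfl | rfl | rfl | rfl | rfl <;> decide
  · simp only [h, not_false_iff, if_true]
    simp only [List.mem_cons, List.not_mem_nil, or_false, not_or] at h
    obtain ⟨h1, h2, h3, h4, h5⟩ := h
    have b1 : (('A' : Char) == c) = false := by simp; exact fun e => h1 e.symm
    have b2 : (('T' : Char) == c) = false := by simp; exact fun e => h2 e.symm
    have b3 : (('G' : Char) == c) = false := by simp; exact fun e => h3 e.symm
    have b4 : (('C' : Char) == c) = false := by simp; exact fun e => h4 e.symm
    have b5 : (('N' : Char) == c) = false := by simp; exact fun e => h5 e.symm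
    simp [pvTable_eq, PySem.Dict.getD, PySem.Dict.get?, List.find?,
      b1, b2, b3, b4, b5]

-- the table's outputs are already uppercase
lemma pvTable_upper (c : Char) :
    PySem.Chars.upperChar (pvTable.getD c 'N') = pvTable.getD c 'N' := by
  rw [pvTable_getD]
  by_cases h : c ∈ (['A', 'T', 'G', 'C', 'N'] : List Char)
  · simp only [List.mem_cons, List.not_mem_nil, or_false] at h
    rcases h with rfl | rfl | rfl | rfl | rfl <;> decide
  · simp [h]; decide

-- A's loop, characterised as a map
lemma pvLoop (cs : List Char) (acc : String) :
    (cs.foldl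
      (fun standard base =>
        if base ∉ (['A', 'T', 'G', 'C', 'N'] : List Char) then standard.push 'N'
        else standard.push base)
      acc).toList = acc.toList ++ cs.map (fun c => pvTable.getD c 'N') := by
  induction cs generalizing acc with
  | nil => simp
  | cons c cs ih =>
    simp only [List.foldl_cons, List.map_cons, ih]
    rw [pvTable_getD c]
    by_cases h : c ∈ (['A', 'T', 'G', 'C', 'N'] : List Char) <;> simp [h]

-- ===== VERDICT (by name: the statement is the Claim_ definition above) =====
theorem getupper_standard_spec : Claim_equal_getupper_standard := by
  intro seq _
  unfold Spec_getupper_standard getupper_standard getupper_standard_alt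
  apply String.ext
  show (PySem.Str.upper _).toList = _
  rw [PySem.Str.toList_upper]
  rw [pvLoop]
  simp [PySem.Chars.upper, List.map_map, Function.comp_def, pvTable_upper]
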